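-- pv_equiv track=rewrite | github.com/DatLe328/AI-Powered-Recruitment-Platform | ml/src/scoring/skill_extractor.py | _flatten_one
-- ===== SOURCE A (Python) =====
-- def _norm(s: str) -> str:
--     return " ".join(str(s or "").strip().lower().split())
--
-- def _unique_keep_order(seq):
--     seen = set(); out = []
--     for x in seq:
--         if x not in seen:
--             out.append(x); seen.add(x)
--     return out
--
-- def _flatten_one(obj):
--     flat = {}
--     if not isinstance(obj, dict):
--         return flat
--     for _, mapping in obj.items():
--         if not isinstance(mapping, dict):
--             continue
--         for canon, aliases in mapping.items():
--             if isinstance(aliases, (list, tuple, set)):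
--                 a = [str(x) for x in aliases if isinstance(x, str)]
--             elif isinstance(aliases, str):
--                 a = [aliases]
--             else:
--                 a = []
--             canon_n = _norm(canon)
--             alias_n = [_norm(x) for x in ([canon] + a) if isinstance(x, str) and x.strip()]
--             alias_n = _unique_keep_order([x for x in alias_n if x])
--             if not canon_n or not alias_n:
--                 continue
--             if canon_n in flat:
--                 flat[canon_n] = _unique_keep_order(flat[canon_n] + alias_n)
--             else:
--                 flat[canon_n] = alias_n
--     return flat
-- ===== SOURCE B (Python) =====
-- def _norm(s: str) -> str:
--     return " ".join(str(s or "").strip().lower().split())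
--
-- def _flatten_one(obj):
--     if not isinstance(obj, dict):
--         return {}
--     # phase 1: flatten to a stream of (canonical, normalized-alias) pairs
--     pairs = []
--     for mapping in obj.values():
--         if not isinstance(mapping, dict):
--             continue
--         for canon, aliases in mapping.items():
--             if isinstance(aliases, (list, tuple, set)):
--                 a = [x for x in aliases if isinstance(x, str)]
--             elif isinstance(aliases, str):
--                 a = [aliases]
--             else:
--                 a = []
--             canon_n = _norm(canon)
--             if canon_n:
--                 for x in [canon] + a:
--                     if isinstance(x, str) and x.strip():
--                         pairs.append((canon_n, _norm(x)))
--     # phase 2: one grouping pass with a global seen-set; no re-deduplication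
--     flat = {}
--     seen = set()
--     for canon_n, alias in pairs:
--         if alias and (canon_n, alias) not in seen:
--             seen.add((canon_n, alias))
--             flat.setdefault(canon_n, []).append(alias)
--     return flat
-- ===== Notes on version B (the rewrite author's own statement) =====
-- stated objective: alternative
-- what changed: B first flattens the nested dict into a stream of (canonical, normalized-alias) pairs and then groups them in a single pass with one global seen-set, replacing A's per-key list concatenation followed by full re-deduplication on every repeated canonical key. (Pre_ excludes association lists with duplicate outer/inner keys, which cannot arise from a Python dict.)
import Mathlib
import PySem

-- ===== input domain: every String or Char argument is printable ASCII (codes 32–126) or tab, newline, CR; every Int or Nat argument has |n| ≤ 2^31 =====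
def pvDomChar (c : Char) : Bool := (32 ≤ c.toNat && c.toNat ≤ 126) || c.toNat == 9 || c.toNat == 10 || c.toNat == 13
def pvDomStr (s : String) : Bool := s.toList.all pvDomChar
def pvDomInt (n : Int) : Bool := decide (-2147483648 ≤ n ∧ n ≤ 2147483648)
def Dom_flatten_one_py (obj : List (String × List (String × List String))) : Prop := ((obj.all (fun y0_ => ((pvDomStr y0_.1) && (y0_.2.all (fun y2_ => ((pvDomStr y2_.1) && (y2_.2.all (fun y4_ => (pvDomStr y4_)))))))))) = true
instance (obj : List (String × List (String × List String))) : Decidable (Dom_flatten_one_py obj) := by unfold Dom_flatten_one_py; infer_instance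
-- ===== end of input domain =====

-- B builds a flat stream of (canonical, normalized-alias) pairs first and then groups it in a
-- single pass with one global seen-set, instead of A's per-key concatenation + re-deduplication.

-- ===== PORT A =====
-- _norm(s) = " ".join(str(s or "").strip().lower().split())
def pyNorm (s : String) : String :=
  PySem.Str.join " " (PySem.Str.split₀ (PySem.Str.lower (PySem.Str.strip s)))

-- _unique_keep_order: seen-set + output list, literal loop
def pyUniq (seq : List String) : List String :=
  (seq.foldl
    (fun (p : PySem.Set String × List String) x =>
      if ¬ PySem.Set.contains p.1 x then (PySem.Set.add p.1 x, p.2 ++ [x]) else p)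
    (PySem.Set.empty, [])).2

-- body of A's inner loop over one (canon, aliases) item (aliases is a list[str], so the
-- isinstance branch keeps it unchanged)
def aEntry (flat : PySem.Dict String (List String)) (e : String × List String) :
    PySem.Dict String (List String) :=
  let a := e.2
  let canon_n := pyNorm e.1
  let alias_n := ((e.1 :: a).filter (fun x => PySem.Str.strip x ≠ "")).map pyNorm
  let alias_n := pyUniq (alias_n.filter (fun x => x ≠ ""))
  if canon_n = "" ∨ alias_n = [] then flat
  else if flat.contains canon_n then
    flat.insert canon_n (pyUniq (flat.getD canon_n [] ++ alias_n))
  else flat.insert canon_n alias_n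

def flatten_one_py (obj : List (String × List (String × List String))) :
    List (String × List String) :=
  (obj.foldl (fun flat m => m.2.foldl aEntry flat) PySem.Dict.empty).items

-- ===== PORT B =====
-- phase 1, inner loops: emit (canon_n, _norm(x)) for each kept x of one (canon, aliases) item
def bEntryPairs (pairs : List (String × String)) (e : String × List String) :
    List (String × String) :=
  let canon_n := pyNorm e.1
  if canon_n ≠ "" then
    (e.1 :: e.2).foldl
      (fun pairs x =>
        if PySem.Str.strip x ≠ "" then pairs ++ [(canon_n, pyNorm x)] else pairs)
      pairs
  else pairs

-- phase 2 body: one grouping step guarded by the global seen-set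
def bGroupStep (st : PySem.Dict String (List String) × PySem.Set (String × String))
    (pr : String × String) :
    PySem.Dict String (List String) × PySem.Set (String × String) :=
  if pr.2 ≠ "" ∧ ¬ PySem.Set.contains st.2 pr then
    (st.1.modify pr.1 [] (fun b => b ++ [pr.2]), PySem.Set.add st.2 pr)
  else st

def flatten_one_py_alt (obj : List (String × List (String × List String))) :
    List (String × List String) :=
  let pairs := obj.foldl (fun pairs m => m.2.foldl bEntryPairs pairs) ([] : List (String × String))
  ((pairs.foldl bGroupStep
      (PySem.Dict.empty, (PySem.Set.empty : PySem.Set (String × String)))).1).items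

-- ===== PRECONDITION & SPEC =====
-- Pre_ excludes association lists with duplicate outer or duplicate inner keys: they do not
-- represent a Python dict (a dict literal collapses duplicates), so iteration over them is a
-- corner of the encoding, not of A.
def Pre_flatten_one_py (obj : List (String × List (String × List String))) : Prop :=
  (obj.map Prod.fst).Nodup ∧ ∀ m ∈ obj, (m.2.map Prod.fst).Nodup
instance (obj : List (String × List (String × List String))) : Decidable (Pre_flatten_one_py obj) := by
  unfold Pre_flatten_one_py; infer_instance

def pvWitness_flatten_one_py : (List (String × List (String × List String))) :=
  [("general", [("Python", ["py", " Python "]), ("C", [])]), ("other", [("Python", ["CPython"])])]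

def Spec_flatten_one_py (obj : List (String × List (String × List String)))
    (out : List (String × List String)) : Prop := out = flatten_one_py_alt obj
instance (obj : List (String × List (String × List String))) (out : List (String × List String)) :
    Decidable (Spec_flatten_one_py obj out) := by unfold Spec_flatten_one_py; infer_instance

-- ===== CLAIM (what is proved, stated in full; the proofs are below) =====
def Claim_equal_flatten_one_py : Prop :=
  ∀ (obj : List (String × List (String × List String))), Dom_flatten_one_py obj →
    Pre_flatten_one_py obj → Spec_flatten_one_py obj (flatten_one_py obj)

-- ===== LEMMAS AND PROOFS =====

-- incremental first-occurrence dedup: merge l into accumulator b, skipping elements already seen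
def dstep (b : List String) (a : String) : List String := if a ∈ b then b else b ++ [a]
def dfrom (b l : List String) : List String := l.foldl dstep b

-- the normalized candidate list of one entry
def Lof (e : String × List String) : List String :=
  ((e.1 :: e.2).filter (fun x => PySem.Str.strip x ≠ "")).map pyNorm

-- phase-1 pairs contributed by one entry
def entryPairs (e : String × List String) : List (String × String) :=
  if pyNorm e.1 ≠ "" then (Lof e).map (fun a => (pyNorm e.1, a)) else []

-- B's grouping step with the seen-set replaced by a direct bucket-membership test
def gstep (c : String) (flat : PySem.Dict String (List String)) (a : String) :
    PySem.Dict String (List String) :=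
  if a ≠ "" ∧ a ∉ flat.getD c [] then flat.insert c (flat.getD c [] ++ [a]) else flat

-- invariant tying B's seen-set to the buckets
def FlatInv (flat : PySem.Dict String (List String)) (seen : PySem.Set (String × String)) : Prop :=
  flat.keys.Nodup ∧ (∀ c, (flat.getD c []).Nodup) ∧
    (∀ c a, (c, a) ∈ seen ↔ a ∈ flat.getD c [])

lemma dfrom_nil (b : List String) : dfrom b [] = b := rfl

lemma dfrom_cons (b : List String) (x : String) (t : List String) :
    dfrom b (x :: t) = dfrom (dstep b x) t := rfl

lemma dfrom_append (b l1 l2 : List String) : dfrom b (l1 ++ l2) = dfrom (dfrom b l1) l2 := by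
  simp [dfrom, List.foldl_append]

lemma mem_dfrom (b l : List String) (x : String) : x ∈ dfrom b l ↔ x ∈ b ∨ x ∈ l := by
  induction l generalizing b with
  | nil => simp [dfrom]
  | cons a t ih =>
    rw [dfrom_cons]
    by_cases ha : a ∈ b
    · have h1 : dstep b a = b := by simp [dstep, ha]
      rw [h1, ih, List.mem_cons]
      constructor
      · rintro (h | h)
        · exact Or.inl h
        · exact Or.inr (Or.inr h)
      · rintro (h | rfl | h)
        · exact Or.inl h
        · exact Or.inl ha
        · exact Or.inr h
    · have h1 : dstep b a = b ++ [a] := by simp [dstep, ha]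
      rw [h1, ih]
      simp only [List.mem_append, List.mem_cons]
      tauto

lemma dfrom_subset (b : List String) : ∀ l, (∀ x ∈ l, x ∈ b) → dfrom b l = b := by
  intro l
  induction l with
  | nil => intro _; rfl
  | cons a t ih =>
    intro h
    have h1 : dstep b a = b := by simp [dstep, h a (by simp)]
    rw [dfrom_cons, h1]
    exact ih (fun x hx => h x (by simp [hx]))

lemma dfrom_nodup_disjoint (l : List String) :
    ∀ b, l.Nodup → (∀ x ∈ l, x ∉ b) → dfrom b l = b ++ l := by
  induction l with
  | nil => intro b _ _; simp [dfrom]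
  | cons a t ih =>
    intro b hnd hdis
    have ha : a ∉ b := hdis a (by simp)
    have h1 : dstep b a = b ++ [a] := by simp [dstep, ha]
    rw [dfrom_cons, h1]
    have := ih (b ++ [a]) (List.Nodup.of_cons hnd)
      (fun x hx => by
        simp only [List.mem_append, List.mem_singleton]
        rintro (h | rfl)
        · exact hdis x (by simp [hx]) h
        · exact (List.nodup_cons.mp hnd).1 hx)
    rw [this]
    simp

lemma nodup_dfrom (l : List String) : ∀ b, b.Nodup → (dfrom b l).Nodup := by
  induction l with
  | nil => intro b h; exact h
  | cons a t ih =>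
    intro b hb
    rw [dfrom_cons]
    by_cases ha : a ∈ b
    · have h1 : dstep b a = b := by simp [dstep, ha]
      rw [h1]
      exact ih b hb
    · have h1 : dstep b a = b ++ [a] := by simp [dstep, ha]
      rw [h1]
      refine ih (b ++ [a]) ?_
      rw [List.nodup_append]
      exact ⟨hb, List.nodup_singleton a,
        by simpa [List.Disjoint] using fun y hy (hye : y = a) => ha (hye ▸ hy)⟩

lemma dfrom_prefix (l : List String) : ∀ b, ∃ t, dfrom b l = b ++ t := by
  induction l with
  | nil => intro b; exact ⟨[], by simp [dfrom]⟩
  | cons a t ih =>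
    intro b
    rw [dfrom_cons]
    by_cases ha : a ∈ b
    · have h1 : dstep b a = b := by simp [dstep, ha]
      rw [h1]
      exact ih b
    · have h1 : dstep b a = b ++ [a] := by simp [dstep, ha]
      rw [h1]
      obtain ⟨u, hu⟩ := ih (b ++ [a])
      exact ⟨a :: u, by simp [hu]⟩

lemma dfrom_idem (l : List String) :
    ∀ a b, (∀ x ∈ a, x ∈ b) → dfrom b (dfrom a l) = dfrom b l := by
  induction l with
  | nil =>
    intro a b hab
    simpa [dfrom] using dfrom_subset b a hab
  | cons x t ih =>
    intro a b hab
    by_cases hxa : x ∈ a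
    · have h1 : dfrom a (x :: t) = dfrom a t := by
        rw [dfrom_cons]; simp [dstep, hxa]
      have h2 : dfrom b (x :: t) = dfrom b t := by
        rw [dfrom_cons]; simp [dstep, hab x hxa]
      rw [h1, h2]
      exact ih a b hab
    · have h1 : dfrom a (x :: t) = dfrom (a ++ [x]) t := by
        rw [dfrom_cons]; simp [dstep, hxa]
      by_cases hxb : x ∈ b
      · have h2 : dfrom b (x :: t) = dfrom b t := by
          rw [dfrom_cons]; simp [dstep, hxb]
        rw [h1, h2]
        exact ih (a ++ [x]) b (by
          intro y hy
          rcases List.mem_append.mp hy with h | h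
          · exact hab y h
          · rw [List.mem_singleton.mp h]; exact hxb)
      · have h2 : dfrom b (x :: t) = dfrom (b ++ [x]) t := by
          rw [dfrom_cons]; simp [dstep, hxb]
        obtain ⟨u, hu⟩ := dfrom_prefix t (a ++ [x])
        have hsub : ∀ y ∈ a ++ [x], y ∈ b ++ [x] := by
          intro y hy
          rcases List.mem_append.mp hy with h | h
          · exact List.mem_append.mpr (Or.inl (hab y h))
          · exact List.mem_append.mpr (Or.inr h)
        have hba : dfrom b (a ++ [x]) = b ++ [x] := by
          rw [dfrom_append, dfrom_subset b a hab]
          show dfrom b [x] = b ++ [x]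
          rw [dfrom_cons]
          simp [dstep, hxb, dfrom]
        have lhs : dfrom b (dfrom (a ++ [x]) t) = dfrom (b ++ [x]) u := by
          rw [hu, dfrom_append, hba]
        have lhs' : dfrom (b ++ [x]) (dfrom (a ++ [x]) t) = dfrom (b ++ [x]) u := by
          rw [hu, dfrom_append, dfrom_subset (b ++ [x]) (a ++ [x]) hsub]
        rw [h1, h2, lhs, ← lhs']
        exact ih (a ++ [x]) (b ++ [x]) hsub

lemma pyUniq_core (l : List String) :
    ∀ s : List String,
      l.foldl
        (fun (p : PySem.Set String × List String) x =>
          if ¬ PySem.Set.contains p.1 x then (PySem.Set.add p.1 x, p.2 ++ [x]) else p)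
        (s, s) = (dfrom s l, dfrom s l) := by
  induction l with
  | nil => intro s; simp [dfrom]
  | cons x t ih =>
    intro s
    rw [List.foldl_cons, dfrom_cons]
    show List.foldl
        (fun (p : PySem.Set String × List String) x =>
          if ¬ PySem.Set.contains p.1 x then (PySem.Set.add p.1 x, p.2 ++ [x]) else p)
        (if ¬ PySem.Set.contains (s : PySem.Set String) x = true
          then (PySem.Set.add s x, s ++ [x]) else ((s : PySem.Set String), s)) t =
      (dfrom (dstep s x) t, dfrom (dstep s x) t)
    have hstep :
        (if ¬ PySem.Set.contains (s : PySem.Set String) x = true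
          then (PySem.Set.add s x, s ++ [x]) else ((s : PySem.Set String), s)) =
        ((dstep s x : PySem.Set String), dstep s x) := by
      by_cases hx : x ∈ s
      · simp [PySem.Set.contains, dstep, hx]
      · simp [PySem.Set.contains, PySem.Set.add, dstep, hx]
    rw [hstep]
    exact ih (dstep s x)

lemma pyUniq_eq (l : List String) : pyUniq l = dfrom [] l := by
  have h := pyUniq_core l []
  calc pyUniq l
      = (l.foldl
          (fun (p : PySem.Set String × List String) x =>
            if ¬ PySem.Set.contains p.1 x then (PySem.Set.add p.1 x, p.2 ++ [x]) else p)
          (([] : List String), ([] : List String))).2 := rfl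
    _ = (dfrom [] l, dfrom [] l).2 := by rw [h]
    _ = dfrom [] l := rfl

lemma dfrom_nil_ne (b : List String) (l : List String) (h : l ≠ []) : dfrom b l ≠ [] := by
  obtain ⟨x, t, rfl⟩ := List.exists_cons_of_ne_nil h
  exact List.ne_nil_of_mem ((mem_dfrom b (x :: t) x).mpr (Or.inr (by simp)))

lemma contains_of_mem_getD (flat : PySem.Dict String (List String)) (c a : String)
    (h : a ∈ flat.getD c []) : flat.contains c = true := by
  cases hc : flat.contains c with
  | true => rfl
  | false =>
    rw [PySem.Dict.getD_of_not_contains flat [] hc] at h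
    simp at h

lemma insert_getD_self (d : PySem.Dict String (List String)) (k : String)
    (hnd : d.keys.Nodup) (hc : d.contains k = true) : d.insert k (d.getD k []) = d := by
  apply PySem.Dict.ext
  rw [PySem.Dict.items_insert_of_contains d (d.getD k []) hc]
  conv_rhs => rw [← List.map_id d.items]
  apply List.map_congr_left
  intro p hp
  by_cases hpk : p.1 = k
  · have hmem : (k, p.2) ∈ d.items := by rw [← hpk]; exact hp
    have hv := PySem.Dict.getD_of_mem_items d hmem hnd []
    have hbeq : (p.1 == k) = true := by simp [hpk]
    rw [hbeq]
    simp only [if_true, id_eq, hv]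
    rw [← hpk]
  · have hbeq : (p.1 == k) = false := by simp [hpk]
    rw [hbeq]
    simp

-- B's grouping fold over one entry's pairs, with the seen-set turned into bucket membership
lemma group_fold_map (c : String) (L : List String) :
    ∀ (flat : PySem.Dict String (List String)) (seen : PySem.Set (String × String)),
      (∀ c' a', (c', a') ∈ seen ↔ a' ∈ flat.getD c' []) →
      ((L.map (fun a => (c, a))).foldl bGroupStep (flat, seen)).1 = L.foldl (gstep c) flat ∧
      (∀ c' a',
        (c', a') ∈ ((L.map (fun a => (c, a))).foldl bGroupStep (flat, seen)).2 ↔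
        a' ∈ (((L.map (fun a => (c, a))).foldl bGroupStep (flat, seen)).1).getD c' []) := by
  induction L with
  | nil => intro flat seen h; exact ⟨rfl, h⟩
  | cons a t ih =>
    intro flat seen h
    rw [List.map_cons, List.foldl_cons, List.foldl_cons]
    by_cases hg : a ≠ "" ∧ a ∉ flat.getD c []
    · have hnotin : (c, a) ∉ seen := fun hmem => hg.2 ((h c a).mp hmem)
      have hguard : ((c, a).2 ≠ "" ∧ ¬ PySem.Set.contains seen (c, a) = true) :=
        ⟨hg.1, by simp [PySem.Set.contains, hnotin]⟩
      have hstep : bGroupStep (flat, seen) (c, a) =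
          (flat.insert c (flat.getD c [] ++ [a]), PySem.Set.add seen (c, a)) := by
        simp only [bGroupStep]
        rw [if_pos hguard]
        rfl
      have hgstep : gstep c flat a = flat.insert c (flat.getD c [] ++ [a]) := by
        simp [gstep, hg]
      rw [hstep, hgstep]
      apply ih
      intro c' a'
      rw [PySem.Set.mem_add, h c' a', PySem.Dict.getD_insert]
      by_cases hc' : c' = c
      · subst hc'
        rw [if_pos rfl]
        simp [List.mem_append]
      · rw [if_neg hc']
        simp [Prod.ext_iff, hc']
    · have hguardn : ¬ ((c, a).2 ≠ "" ∧ ¬ PySem.Set.contains seen (c, a) = true) := by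
        rintro ⟨h1, h2⟩
        exact hg ⟨h1, fun hmem => h2 (by simpa [PySem.Set.contains] using (h c a).mpr hmem)⟩
      have hstep : bGroupStep (flat, seen) (c, a) = (flat, seen) := by
        simp only [bGroupStep]
        rw [if_neg hguardn]
      have hgstep : gstep c flat a = flat := by simp [gstep, hg]
      rw [hstep, hgstep]
      exact ih flat seen h

-- the bucket-membership fold in closed form
lemma gfold_eq (c : String) (L : List String) :
    ∀ flat : PySem.Dict String (List String), flat.keys.Nodup →
      L.foldl (gstep c) flat =
        if L.filter (fun x => x ≠ "") = [] then flat
        else flat.insert c (dfrom (flat.getD c []) (L.filter (fun x => x ≠ ""))) := by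
  induction L with
  | nil => intro flat _; simp
  | cons a t ih =>
    intro flat hnd
    rw [List.foldl_cons]
    by_cases ha : a = ""
    · have hg : gstep c flat a = flat := by simp [gstep, ha]
      rw [hg, ih flat hnd]
      simp [ha]
    · have hfil : (a :: t).filter (fun x => x ≠ "") = a :: t.filter (fun x => x ≠ "") := by
        simp [ha]
      by_cases hmem : a ∈ flat.getD c []
      · have hg : gstep c flat a = flat := by simp [gstep, hmem]
        have hdstep : dstep (flat.getD c []) a = flat.getD c [] := by simp [dstep, hmem]
        rw [hg, ih flat hnd, hfil]
        by_cases ht : t.filter (fun x => x ≠ "") = []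
        · rw [if_pos ht, if_neg (by simp), ht, dfrom_cons, hdstep, dfrom_nil]
          exact (insert_getD_self flat c hnd (contains_of_mem_getD flat c a hmem)).symm
        · rw [if_neg ht, if_neg (by simp), dfrom_cons, hdstep]
      · have hg : gstep c flat a = flat.insert c (flat.getD c [] ++ [a]) := by
          simp [gstep, ha, hmem]
        have hget : (flat.insert c (flat.getD c [] ++ [a])).getD c [] =
            flat.getD c [] ++ [a] := PySem.Dict.getD_insert_self _ _ _ _
        have hdstep : dstep (flat.getD c []) a = flat.getD c [] ++ [a] := by
          simp [dstep, hmem]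
        rw [hg, ih _ (PySem.Dict.nodup_keys_insert _ _ _ hnd), hfil]
        by_cases ht : t.filter (fun x => x ≠ "") = []
        · rw [if_pos ht, if_neg (by simp), ht, dfrom_cons, hdstep, dfrom_nil]
        · rw [if_neg ht, if_neg (by simp), hget, PySem.Dict.insert_insert_self,
            dfrom_cons, hdstep]

-- A's per-entry update, with the canonical key and candidate list abstracted out
def aEntryAbs (c : String) (L : List String) (flat : PySem.Dict String (List String)) :
    PySem.Dict String (List String) :=
  if c = "" ∨ pyUniq (L.filter (fun x => x ≠ "")) = [] then flat
  else if flat.contains c then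
    flat.insert c (pyUniq (flat.getD c [] ++ pyUniq (L.filter (fun x => x ≠ ""))))
  else flat.insert c (pyUniq (L.filter (fun x => x ≠ "")))

lemma aEntry_abs (flat : PySem.Dict String (List String)) (e : String × List String) :
    aEntry flat e = aEntryAbs (pyNorm e.1) (Lof e) flat := rfl

-- abstract core: B's grouping over one key's pairs equals A's update, keeping the invariant
lemma entry_core (c : String) (L : List String)
    (flat : PySem.Dict String (List String)) (seen : PySem.Set (String × String))
    (hInv : FlatInv flat seen) (hc : c ≠ "") :
    ((L.map (fun a => (c, a))).foldl bGroupStep (flat, seen)).1 = aEntryAbs c L flat ∧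
    FlatInv ((L.map (fun a => (c, a))).foldl bGroupStep (flat, seen)).1
      ((L.map (fun a => (c, a))).foldl bGroupStep (flat, seen)).2 := by
  obtain ⟨hkeys, hbuckets, hseen⟩ := hInv
  obtain ⟨hfst, hsnd⟩ := group_fold_map c L flat seen hseen
  have hclosed := gfold_eq c L flat hkeys
  have hA : aEntryAbs c L flat =
      (if L.filter (fun x => x ≠ "") = [] then flat
       else flat.insert c (dfrom (flat.getD c []) (L.filter (fun x => x ≠ "")))) := by
    unfold aEntryAbs
    by_cases heff : L.filter (fun x => x ≠ "") = []
    · rw [if_pos heff, if_pos (Or.inr (by rw [pyUniq_eq, heff]; rfl))]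
    · have hne : pyUniq (L.filter (fun x => x ≠ "")) ≠ [] := by
        rw [pyUniq_eq]
        exact dfrom_nil_ne [] _ heff
      rw [if_neg heff, if_neg (fun hor => hor.elim hc hne)]
      by_cases hcon : flat.contains c = true
      · rw [if_pos hcon]
        congr 1
        rw [pyUniq_eq (flat.getD c [] ++ pyUniq (L.filter (fun x => x ≠ ""))),
          pyUniq_eq (L.filter (fun x => x ≠ "")), dfrom_append,
          dfrom_nodup_disjoint (flat.getD c []) [] (hbuckets c) (by simp), List.nil_append]
        exact dfrom_idem (L.filter (fun x => x ≠ "")) [] (flat.getD c []) (by simp)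
      · rw [if_neg hcon, PySem.Dict.getD_of_not_contains flat [] (by simpa using hcon)]
        congr 1
        exact pyUniq_eq (L.filter (fun x => x ≠ ""))
  refine ⟨by rw [hfst, hclosed, hA], ?_, ?_, ?_⟩
  · rw [hfst, hclosed]
    by_cases heff : L.filter (fun x => x ≠ "") = []
    · rw [if_pos heff]; exact hkeys
    · rw [if_neg heff]; exact PySem.Dict.nodup_keys_insert _ _ _ hkeys
  · rw [hfst, hclosed]
    intro c'
    by_cases heff : L.filter (fun x => x ≠ "") = []
    · rw [if_pos heff]; exact hbuckets c'
    · rw [if_neg heff, PySem.Dict.getD_insert]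
      by_cases hc' : c' = c
      · rw [if_pos hc']
        exact nodup_dfrom (L.filter (fun x => x ≠ "")) _ (hbuckets c)
      · rw [if_neg hc']; exact hbuckets c'
  · exact hsnd

-- one entry of the real programs
lemma entry_step (e : String × List String) :
    ∀ (flat : PySem.Dict String (List String)) (seen : PySem.Set (String × String)),
      FlatInv flat seen →
      ((entryPairs e).foldl bGroupStep (flat, seen)).1 = aEntry flat e ∧
      FlatInv ((entryPairs e).foldl bGroupStep (flat, seen)).1
          ((entryPairs e).foldl bGroupStep (flat, seen)).2 := by
  intro flat seen hInv
  by_cases hc : pyNorm e.1 = ""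
  · have hep : entryPairs e = [] := by simp [entryPairs, hc]
    have hA : aEntry flat e = flat := by
      rw [aEntry_abs]
      unfold aEntryAbs
      rw [if_pos (Or.inl hc)]
    rw [hep]
    simp only [List.foldl_nil]
    exact ⟨hA.symm, hInv⟩
  · have hep : entryPairs e = (Lof e).map (fun a => (pyNorm e.1, a)) := by
      simp [entryPairs, hc]
    obtain ⟨h1, h2⟩ := entry_core (pyNorm e.1) (Lof e) flat seen hInv hc
    constructor
    · rw [hep, h1, aEntry_abs]
    · rw [hep]
      exact h2

-- one mapping: fold the entry lemma through its entries
lemma level2 (entries : List (String × List String)) :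
    ∀ st : PySem.Dict String (List String) × PySem.Set (String × String),
      FlatInv st.1 st.2 →
      (entries.foldl (fun st e => (entryPairs e).foldl bGroupStep st) st).1 =
        entries.foldl aEntry st.1 ∧
      FlatInv (entries.foldl (fun st e => (entryPairs e).foldl bGroupStep st) st).1
          (entries.foldl (fun st e => (entryPairs e).foldl bGroupStep st) st).2 := by
  induction entries with
  | nil => intro st h; exact ⟨rfl, h⟩
  | cons e t ih =>
    intro st h
    rw [List.foldl_cons, List.foldl_cons]
    obtain ⟨h1, h2⟩ := entry_step e st.1 st.2 h
    have hst : (st.1, st.2) = st := rfl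
    rw [hst] at h1 h2
    obtain ⟨ih1, ih2⟩ := ih _ h2
    exact ⟨by rw [ih1, h1], ih2⟩

-- the whole object
lemma level1 (obj : List (String × List (String × List String))) :
    ∀ st : PySem.Dict String (List String) × PySem.Set (String × String),
      FlatInv st.1 st.2 →
      (obj.foldl (fun st m => m.2.foldl (fun st e => (entryPairs e).foldl bGroupStep st) st) st).1 =
        obj.foldl (fun flat m => m.2.foldl aEntry flat) st.1 := by
  induction obj with
  | nil => intro st _; rfl
  | cons m t ih =>
    intro st h
    rw [List.foldl_cons, List.foldl_cons]
    obtain ⟨h1, h2⟩ := level2 m.2 st h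
    rw [ih _ h2, h1]

lemma bEntryPairs_eq (pairs : List (String × String)) (e : String × List String) :
    bEntryPairs pairs e = pairs ++ entryPairs e := by
  simp only [bEntryPairs, entryPairs]
  by_cases hc : pyNorm e.1 = ""
  · simp [hc]
  · rw [if_pos (show pyNorm e.1 ≠ "" from hc)]
    rw [if_pos (show pyNorm e.1 ≠ "" from hc)]
    rw [PySem.List.foldl_append_ite (p := fun x => PySem.Str.strip x ≠ "")
      (f := fun x => (pyNorm e.1, pyNorm x))]
    rw [show (Lof e).map (fun a => (pyNorm e.1, a)) =
        ((e.1 :: e.2).filter (fun x => PySem.Str.strip x ≠ "")).map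
          (fun x => (pyNorm e.1, pyNorm x)) from by
      unfold Lof
      rw [List.map_map]
      rfl]

lemma build_eq (obj : List (String × List (String × List String))) :
    obj.foldl (fun pairs m => m.2.foldl bEntryPairs pairs) ([] : List (String × String)) =
      obj.flatMap (fun m => m.2.flatMap entryPairs) := by
  have hb : bEntryPairs = fun pairs e => pairs ++ entryPairs e :=
    funext fun pairs => funext fun e => bEntryPairs_eq pairs e
  rw [hb]
  have hinner : (fun (pairs : List (String × String))
      (m : String × List (String × List String)) =>
        m.2.foldl (fun pairs e => pairs ++ entryPairs e) pairs) =
      fun pairs m => pairs ++ m.2.flatMap entryPairs :=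
    funext fun pairs => funext fun m => PySem.List.foldl_append_eq_flatMap entryPairs m.2 pairs
  rw [hinner, PySem.List.foldl_append_eq_flatMap]
  simp

lemma FlatInv_init :
    FlatInv PySem.Dict.empty (PySem.Set.empty : PySem.Set (String × String)) := by
  refine ⟨PySem.Dict.nodup_keys_empty,
    fun c => by rw [PySem.Dict.getD_empty]; exact List.nodup_nil, fun c a => ?_⟩
  rw [PySem.Dict.getD_empty]
  show (c, a) ∈ ([] : List (String × String)) ↔ a ∈ ([] : List String)
  simp

lemma main_eq (obj : List (String × List (String × List String))) :
    flatten_one_py obj = flatten_one_py_alt obj := by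
  simp only [flatten_one_py, flatten_one_py_alt, build_eq, List.foldl_flatMap]
  rw [level1 obj (PySem.Dict.empty, PySem.Set.empty) FlatInv_init]

-- ===== VERDICT (by name: the statement is the Claim_ definition above) =====
theorem flatten_one_py_spec : Claim_equal_flatten_one_py := by
  intro obj _ _
  unfold Spec_flatten_one_py
  exact main_eq obj
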